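-- pv_equiv track=rewrite | github.com/Davyalvs/APC-ICC | APC/Projeto_Final_APC.py | maiuscula
-- ===== SOURCE A (Python) =====
-- def maiuscula(X):
--     posicoes = []
--     ver = 0
--     for i,letra in enumerate(X):
--         if letra == ".":
--             ver = 1
--         if ver == 1 and (letra.islower() or letra.isupper()):
--             ver = 0
--             continue
--         if ver == 0 and letra.isupper() and i > 0:
--             posicoes.append(i)
--
--     return posicoes
-- ===== SOURCE B (Python) =====
-- def maiuscula(X):
--     excluded = set()
--     skip = False
--     for i, c in enumerate(X):
--         if c == ".":
--             skip = True
--         if skip and (c.islower() or c.isupper()):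
--             excluded.add(i)
--             skip = False
--     return [i for i, c in enumerate(X) if c.isupper() and i > 0 and i not in excluded]
-- ===== Notes on version B (the rewrite author's own statement) =====
-- stated objective: alternative
-- what changed: Replaces A's single interleaved state-machine scan (flag mutated while appending) with a two-phase shape: one pass builds a set of indices of cased letters that terminate skip-mode after a period, then a comprehension filters the uppercase positions against that set.
import Mathlib
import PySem

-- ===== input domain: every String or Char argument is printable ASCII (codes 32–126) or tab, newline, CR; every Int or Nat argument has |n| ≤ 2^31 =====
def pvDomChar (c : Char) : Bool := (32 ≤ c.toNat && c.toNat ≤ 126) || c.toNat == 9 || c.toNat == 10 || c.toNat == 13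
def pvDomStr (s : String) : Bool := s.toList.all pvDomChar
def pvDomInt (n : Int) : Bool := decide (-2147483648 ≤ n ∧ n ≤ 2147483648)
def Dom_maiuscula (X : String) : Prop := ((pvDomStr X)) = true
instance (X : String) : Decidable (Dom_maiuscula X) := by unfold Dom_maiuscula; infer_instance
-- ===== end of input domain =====

-- B replaces A's single interleaved flag-and-append scan by a two-phase shape (build the
-- set of skip-terminating indices, then filter the uppercase positions); alternative, same cost.

-- ===== PORT A =====
def maiusculaLoop : List (Int × Char) → List Int → Int → List Int
  | [], posicoes, _ => posicoes
  | (i, letra) :: rest, posicoes, ver =>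
    let ver1 : Int := if letra = '.' then 1 else ver
    if ver1 = 1 ∧ (PySem.Chars.islower letra || PySem.Chars.isupper letra) then
      maiusculaLoop rest posicoes 0
    else if ver1 = 0 ∧ PySem.Chars.isupper letra ∧ i > 0 then
      maiusculaLoop rest (posicoes ++ [i]) ver1
    else
      maiusculaLoop rest posicoes ver1

def maiuscula (X : String) : List Int :=
  maiusculaLoop (PySem.List.enumerate X.toList 0) [] 0

-- ===== PORT B =====
def maiusculaExcl : List (Int × Char) → PySem.Set Int → Bool → PySem.Set Int
  | [], excluded, _ => excluded
  | (i, c) :: rest, excluded, skip =>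
    let skip1 := if c = '.' then true else skip
    if skip1 && (PySem.Chars.islower c || PySem.Chars.isupper c) then
      maiusculaExcl rest (PySem.Set.add excluded i) false
    else
      maiusculaExcl rest excluded skip1

def maiuscula_alt (X : String) : List Int :=
  let excluded := maiusculaExcl (PySem.List.enumerate X.toList 0) PySem.Set.empty false
  (PySem.List.enumerate X.toList 0).filterMap
    (fun p => if PySem.Chars.isupper p.2 && decide (p.1 > 0) && !(PySem.Set.contains excluded p.1)
              then some p.1 else none)

-- ===== PRECONDITION & SPEC =====
def Spec_maiuscula (X : String) (out : List Int) : Prop := out = maiuscula_alt X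
instance (X : String) (out : List Int) : Decidable (Spec_maiuscula X out) := by unfold Spec_maiuscula; infer_instance

-- ===== CLAIM (what is proved, stated in full; the proofs are below) =====
def Claim_equal_maiuscula : Prop := ∀ (X : String), Dom_maiuscula X → Spec_maiuscula X (maiuscula X)

-- ===== LEMMAS AND PROOFS =====

-- every member of the excluded set is an old member or the first component of a processed pair
lemma mem_maiusculaExcl (l : List (Int × Char)) :
    ∀ (E : PySem.Set Int) (s : Bool) (j : Int), j ∈ maiusculaExcl l E s →
      j ∈ E ∨ j ∈ l.map Prod.fst := by
  induction l with
  | nil => intro E s j h; simp [maiusculaExcl] at h; exact Or.inl h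
  | cons p rest ih =>
    intro E s j h
    obtain ⟨i, c⟩ := p
    simp only [maiusculaExcl] at h
    by_cases hb : ((if c = '.' then true else s) &&
        (PySem.Chars.islower c || PySem.Chars.isupper c)) = true
    · rw [if_pos hb] at h
      rcases ih _ _ _ h with hE | hr
      · rcases (PySem.Set.mem_add _ _ _).1 hE with h' | h'
        · exact Or.inl h'
        · exact Or.inr (by simp [h'])
      · exact Or.inr (by simp [hr])
    · rw [if_neg hb] at h
      rcases ih _ _ _ h with hE | hr
      · exact Or.inl hE
      · exact Or.inr (by simp [hr])

lemma mem_maiusculaExcl_of_mem (l : List (Int × Char)) :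
    ∀ (E : PySem.Set Int) (s : Bool) (j : Int), j ∈ E → j ∈ maiusculaExcl l E s := by
  induction l with
  | nil => intro E s j h; simpa [maiusculaExcl] using h
  | cons p rest ih =>
    intro E s j h
    obtain ⟨i, c⟩ := p
    simp only [maiusculaExcl]
    by_cases hb : ((if c = '.' then true else s) &&
        (PySem.Chars.islower c || PySem.Chars.isupper c)) = true
    · rw [if_pos hb]
      exact ih _ _ _ ((PySem.Set.mem_add _ _ _).2 (Or.inl h))
    · rw [if_neg hb]
      exact ih _ _ _ h

lemma maiusculaLoop_eq (l : List (Int × Char)) :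
    ∀ (acc : List Int) (v : Int) (E : PySem.Set Int),
      (v = 0 ∨ v = 1) →
      l.Pairwise (fun p q => p.1 < q.1) →
      (∀ j ∈ E, ∀ p ∈ l, j < p.1) →
      maiusculaLoop l acc v =
        acc ++ l.filterMap
          (fun p => if PySem.Chars.isupper p.2 && decide (p.1 > 0) &&
                       !(PySem.Set.contains (maiusculaExcl l E (v == 1)) p.1)
                    then some p.1 else none) := by
  induction l with
  | nil => intro acc v E _ _ _; simp [maiusculaLoop]
  | cons p rest ih =>
    intro acc v E hv hpw hE
    obtain ⟨i, c⟩ := p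
    have hpw' : rest.Pairwise (fun p q => p.1 < q.1) := hpw.of_cons
    have hilt : ∀ q ∈ rest, i < q.1 := by
      intro q hq; exact List.rel_of_pairwise_cons hpw hq
    have hskip : ((if c = '.' then (1 : Int) else v) = 1) ↔
        ((if c = '.' then true else (v == 1)) = true) := by
      rcases hv with hv | hv <;> by_cases hc : c = '.' <;> simp [hc, hv]
    by_cases hcond : (if c = '.' then (1 : Int) else v) = 1 ∧
        (PySem.Chars.islower c || PySem.Chars.isupper c) = true
    · -- skip-terminating character: A continues with flag 0, B excludes i
      have hA : maiusculaLoop ((i, c) :: rest) acc v = maiusculaLoop rest acc 0 := by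
        simp only [maiusculaLoop]; rw [if_pos hcond]
      have hbB : ((if c = '.' then true else (v == 1)) &&
          (PySem.Chars.islower c || PySem.Chars.isupper c)) = true := by
        simp [hskip.1 hcond.1, hcond.2]
      have hset : maiusculaExcl ((i, c) :: rest) E (v == 1) =
          maiusculaExcl rest (PySem.Set.add E i) false := by
        simp only [maiusculaExcl]; rw [if_pos hbB]
      have hmem : i ∈ maiusculaExcl rest (PySem.Set.add E i) false :=
        mem_maiusculaExcl_of_mem rest _ _ i ((PySem.Set.mem_add _ _ _).2 (Or.inr rfl))
      have hci : PySem.Set.contains (maiusculaExcl rest (PySem.Set.add E i) false) i = true :=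
        (PySem.Set.contains_iff _ _).2 hmem
      have hEi : ∀ j ∈ PySem.Set.add E i, ∀ q ∈ rest, j < q.1 := by
        intro j hj q hq
        rcases (PySem.Set.mem_add _ _ _).1 hj with h' | h'
        · exact lt_trans (hE j h' (i, c) (by simp)) (hilt q hq)
        · exact h' ▸ hilt q hq
      rw [hA, ih acc 0 (PySem.Set.add E i) (Or.inl rfl) hpw' hEi]
      simp only [hset, List.filterMap_cons, hci]
      simp
    · -- not a skip-terminating character: flags agree, B's set just recurses
      have hbB : ((if c = '.' then true else (v == 1)) &&
          (PySem.Chars.islower c || PySem.Chars.isupper c)) = false := by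
        have hne : ¬ (((if c = '.' then true else (v == 1)) = true) ∧
            (PySem.Chars.islower c || PySem.Chars.isupper c) = true) := by
          rintro ⟨h1, h2⟩; exact hcond ⟨hskip.2 h1, h2⟩
        cases h1 : (if c = '.' then true else (v == 1)) <;>
          cases h2 : (PySem.Chars.islower c || PySem.Chars.isupper c) <;> simp_all
      have hset : maiusculaExcl ((i, c) :: rest) E (v == 1) =
          maiusculaExcl rest E (if c = '.' then true else (v == 1)) := by
        simp only [maiusculaExcl]; rw [if_neg (by rw [hbB]; simp)]
      have hnotmem : PySem.Set.contains
          (maiusculaExcl rest E (if c = '.' then true else (v == 1))) i = false := by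
        cases hcm : PySem.Set.contains
            (maiusculaExcl rest E (if c = '.' then true else (v == 1))) i
        · rfl
        · exfalso
          have hm := (PySem.Set.contains_iff _ _).1 hcm
          rcases mem_maiusculaExcl rest _ _ i hm with h' | h'
          · exact absurd (hE i h' (i, c) (by simp)) (lt_irrefl i)
          · obtain ⟨q, hq, hq2⟩ := List.mem_map.1 h'
            exact absurd (hq2 ▸ hilt q hq) (lt_irrefl i)
      have hE' : ∀ j ∈ E, ∀ q ∈ rest, j < q.1 := by
        intro j hj q hq; exact hE j hj q (by simp [hq])
      have hv1 : (if c = '.' then (1 : Int) else v) = 0 ∨ (if c = '.' then (1 : Int) else v) = 1 := by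
        rcases hv with hv | hv <;> by_cases hc : c = '.' <;> simp [hc, hv]
      have hvs : ((if c = '.' then (1 : Int) else v) == 1) = (if c = '.' then true else (v == 1)) := by
        rcases hv with hv | hv <;> by_cases hc : c = '.' <;> simp [hc, hv]
      have ihrec := fun acc => ih acc (if c = '.' then (1 : Int) else v) E hv1 hpw' hE'
      simp only [hvs] at ihrec
      by_cases happ : (if c = '.' then (1 : Int) else v) = 0 ∧
          PySem.Chars.isupper c = true ∧ i > 0
      · -- A appends i; B's filter keeps the head
        have hA : maiusculaLoop ((i, c) :: rest) acc v =
            maiusculaLoop rest (acc ++ [i]) (if c = '.' then (1 : Int) else v) := by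
          simp only [maiusculaLoop]; rw [if_neg hcond, if_pos happ]
        rw [hA, ihrec (acc ++ [i])]
        simp only [hset, List.filterMap_cons, happ.2.1, happ.2.2, hnotmem]
        simp
      · -- A skips the head; B's filter drops it
        have hA : maiusculaLoop ((i, c) :: rest) acc v =
            maiusculaLoop rest acc (if c = '.' then (1 : Int) else v) := by
          simp only [maiusculaLoop]; rw [if_neg hcond, if_neg happ]
        have hhead : (PySem.Chars.isupper c && decide (i > 0) &&
            !(PySem.Set.contains (maiusculaExcl rest E (if c = '.' then true else (v == 1))) i))
            = false := by
          by_cases hu : PySem.Chars.isupper c = true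
          · by_cases hi : i > 0
            · exfalso
              apply happ
              have hcased : (PySem.Chars.islower c || PySem.Chars.isupper c) = true := by simp [hu]
              have hv0 : (if c = '.' then (1 : Int) else v) = 0 := by
                rcases hv1 with h0 | h1
                · exact h0
                · exact absurd ⟨h1, hcased⟩ hcond
              exact ⟨hv0, hu, hi⟩
            · simp [hi]
          · rw [Bool.not_eq_true] at hu; simp [hu]
        rw [hA, ihrec acc]
        simp only [hset, List.filterMap_cons, hhead]
        simp

-- ===== VERDICT (by name: the statement is the Claim_ definition above) =====
theorem maiuscula_spec : Claim_equal_maiuscula := by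
  intro X _
  unfold Spec_maiuscula maiuscula maiuscula_alt
  exact maiusculaLoop_eq (PySem.List.enumerate X.toList 0) [] 0 PySem.Set.empty
    (Or.inl rfl) (PySem.List.pairwise_lt_enumerate _ _)
    (by intro j hj; simp [PySem.Set.empty] at hj)
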